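-- pv_equiv track=rewrite | github.com/0klap/OPG | Python/Doma/newTimeTesting.py | QuickSortSteps
-- ===== SOURCE A (Python) =====
-- def QuickSortSteps(pole, l_kraj, p_kraj):
--     porovnania = 0
--     presuny = 0
--
--     if l_kraj < p_kraj:
--         i = l_kraj
--         for j in range(l_kraj, p_kraj):
--             porovnania += 1
--             if pole[j] < pole[p_kraj]:
--                 pole[j], pole[i] = pole[i], pole[j]
--                 presuny += 2
--                 i += 1
--         pole[i], pole[p_kraj] = pole[p_kraj], pole[i]
--         presuny += 2
--
--         lave_porovnania, lave_presuny = QuickSortSteps(pole, l_kraj, i - 1)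
--         prave_porovnania, prave_presuny = QuickSortSteps(pole, i + 1, p_kraj)
--
--         porovnania += lave_porovnania + prave_porovnania
--         presuny += lave_presuny + prave_presuny
--
--     return porovnania, presuny
-- ===== SOURCE B (Python) =====
-- def QuickSortSteps(pole, l_kraj, p_kraj):
--     cmp_total = 0
--     mov_total = 0
--     stack = [(l_kraj, p_kraj)]
--     while stack:
--         lo, hi = stack.pop()
--         if lo >= hi:
--             continue
--         i = lo
--         j = lo
--         while j < hi:
--             cmp_total += 1
--             if pole[j] < pole[hi]:
--                 t = pole[i]
--                 pole[i] = pole[j]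
--                 pole[j] = t
--                 mov_total += 2
--                 i += 1
--             j += 1
--         t = pole[i]
--         pole[i] = pole[hi]
--         pole[hi] = t
--         mov_total += 2
--         stack.append((i + 1, hi))
--         stack.append((lo, i - 1))
--     return cmp_total, mov_total
-- ===== Notes on version B (the rewrite author's own statement) =====
-- stated objective: alternative
-- what changed: The two-sided recursion of quicksort is replaced by an explicit stack of (lo, hi) ranges driven by a while loop, with the partition written as an inline while-j index loop using temp-variable swaps and running totals threaded through it, instead of A's for-range loop, tuple swaps and counts summed up the call tree.
import Mathlib
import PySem

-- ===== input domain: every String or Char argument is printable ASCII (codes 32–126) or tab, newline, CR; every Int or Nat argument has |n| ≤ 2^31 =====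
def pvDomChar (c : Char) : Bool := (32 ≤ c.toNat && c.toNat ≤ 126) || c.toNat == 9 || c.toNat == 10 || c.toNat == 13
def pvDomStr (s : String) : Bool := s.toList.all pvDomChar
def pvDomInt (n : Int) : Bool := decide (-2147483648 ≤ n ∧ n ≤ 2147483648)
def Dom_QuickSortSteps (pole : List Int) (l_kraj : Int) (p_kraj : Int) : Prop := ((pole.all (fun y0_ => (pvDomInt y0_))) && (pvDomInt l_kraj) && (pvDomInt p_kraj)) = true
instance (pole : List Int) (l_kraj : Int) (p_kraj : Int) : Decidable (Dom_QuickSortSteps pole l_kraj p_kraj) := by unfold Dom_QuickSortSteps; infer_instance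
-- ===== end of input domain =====

-- B replaces A's two-sided recursion by an explicit stack of (lo, hi) ranges driven by a while
-- loop, with the partition written as an inline index loop with temp-variable swaps
-- (objective: alternative decomposition, same counts and cost).
-- Both Pythons mutate `pole` in place identically; the equivalence proved here is about the
-- returned (comparisons, moves) pair only.

-- ===== PORT A =====
-- Python simultaneous swap `pole[a], pole[b] = pole[b], pole[a]`: both reads happen first.
def pvSwap (xs : List Int) (a b : Int) : List Int :=
  let va := PySem.List.pyGetD xs b 0
  let vb := PySem.List.pyGetD xs a 0
  PySem.List.pySetD (PySem.List.pySetD xs a va) b vb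

-- one iteration of A's `for j in range(l_kraj, p_kraj)` body; state = (pole, i, porovnania, presuny)
def pvStepA (hi : Int) (st : List Int × Int × Int × Int) (j : Int) : List Int × Int × Int × Int :=
  let por := st.2.2.1 + 1
  if PySem.List.pyGetD st.1 j 0 < PySem.List.pyGetD st.1 hi 0 then
    (pvSwap st.1 j st.2.1, st.2.1 + 1, por, st.2.2.2 + 2)
  else
    (st.1, st.2.1, por, st.2.2.2)

def pvPartA (pole : List Int) (lo hi : Int) : List Int × Int × Int × Int :=
  (PySem.List.pyRange lo hi 1).foldl (pvStepA hi) (pole, lo, 0, 0)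

-- A's recursion, made total by a fuel argument (a guard only: the fuel supplied by the
-- top-level entry always suffices, see pvQsA_fuel below); returns (pole after sorting, porovnania, presuny)
def pvQsA : Nat → List Int → Int → Int → List Int × Int × Int
  | 0, pole, _, _ => (pole, 0, 0)
  | Nat.succ n, pole, l_kraj, p_kraj =>
    if l_kraj < p_kraj then
      let st := pvPartA pole l_kraj p_kraj
      let pole1 := pvSwap st.1 st.2.1 p_kraj
      let left := pvQsA n pole1 l_kraj (st.2.1 - 1)
      let right := pvQsA n left.1 (st.2.1 + 1) p_kraj
      (right.1, st.2.2.1 + (left.2.1 + right.2.1), (st.2.2.2 + 2) + (left.2.2 + right.2.2))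
    else
      (pole, 0, 0)

def QuickSortSteps (pole : List Int) (l_kraj : Int) (p_kraj : Int) : Int × Int :=
  (pvQsA (p_kraj - l_kraj + 1).toNat pole l_kraj p_kraj).2

-- ===== PORT B =====
-- B's inner `while j < hi` loop; the fuel is the number of remaining iterations (hi - j).toNat,
-- so it is a totality guard only.  `t = pole[i]; pole[i] = pole[j]; pole[j] = t` becomes the
-- two pySetD writes with t and pole[j] read from the list before either write, as in Python.
def pvInner (hi : Int) : Nat → Int → List Int → Int → Int → Int → List Int × Int × Int × Int
  | 0, _, pole, i, cmpT, movT => (pole, i, cmpT, movT)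
  | Nat.succ n, j, pole, i, cmpT, movT =>
    if PySem.List.pyGetD pole j 0 < PySem.List.pyGetD pole hi 0 then
      let t := PySem.List.pyGetD pole i 0
      let pole' := PySem.List.pySetD (PySem.List.pySetD pole i (PySem.List.pyGetD pole j 0)) j t
      pvInner hi n (j + 1) pole' (i + 1) (cmpT + 1) (movT + 2)
    else
      pvInner hi n (j + 1) pole i (cmpT + 1) movT

-- B's outer `while stack:` loop; list head = top of stack; fuel is a totality guard only
-- (the fuel supplied by QuickSortSteps_alt always suffices, see pvOuter_fuel below)
def pvOuter : Nat → List (Int × Int) → List Int → Int → Int → Int × Int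
  | 0, _, _, cmpT, movT => (cmpT, movT)
  | Nat.succ _, [], _, cmpT, movT => (cmpT, movT)
  | Nat.succ n, (lo, hi) :: rest, pole, cmpT, movT =>
    if hi ≤ lo then
      pvOuter n rest pole cmpT movT
    else
      let r := pvInner hi (hi - lo).toNat lo pole lo cmpT movT
      let t := PySem.List.pyGetD r.1 r.2.1 0
      let pole' := PySem.List.pySetD (PySem.List.pySetD r.1 r.2.1 (PySem.List.pyGetD r.1 hi 0)) hi t
      pvOuter n ((lo, r.2.1 - 1) :: (r.2.1 + 1, hi) :: rest) pole' r.2.2.1 (r.2.2.2 + 2)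

def QuickSortSteps_alt (pole : List Int) (l_kraj : Int) (p_kraj : Int) : Int × Int :=
  pvOuter (2 * (p_kraj - l_kraj + 1).toNat + 1) [(l_kraj, p_kraj)] pole 0 0

-- ===== PRECONDITION & SPEC =====
-- Pre_ excludes exactly the inputs where Python A raises IndexError: a non-trivial range
-- (l_kraj < p_kraj) whose endpoints are not both valid (possibly negative) indices into pole.
def Pre_QuickSortSteps (pole : List Int) (l_kraj : Int) (p_kraj : Int) : Prop :=
  l_kraj < p_kraj → (-(pole.length : Int) ≤ l_kraj ∧ p_kraj < (pole.length : Int))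
instance (pole : List Int) (l_kraj : Int) (p_kraj : Int) : Decidable (Pre_QuickSortSteps pole l_kraj p_kraj) := by unfold Pre_QuickSortSteps; infer_instance
def pvWitness_QuickSortSteps : List Int × Int × Int := ([3, 1, 2], 0, 2)

def Spec_QuickSortSteps (pole : List Int) (l_kraj : Int) (p_kraj : Int) (out : Int × Int) : Prop := out = QuickSortSteps_alt pole l_kraj p_kraj
instance (pole : List Int) (l_kraj : Int) (p_kraj : Int) (out : Int × Int) : Decidable (Spec_QuickSortSteps pole l_kraj p_kraj out) := by unfold Spec_QuickSortSteps; infer_instance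

-- ===== CLAIM (what is proved, stated in full; the proofs are below) =====
def Claim_equal_QuickSortSteps : Prop := ∀ (pole : List Int) (l_kraj : Int) (p_kraj : Int), Dom_QuickSortSteps pole l_kraj p_kraj → Pre_QuickSortSteps pole l_kraj p_kraj → Spec_QuickSortSteps pole l_kraj p_kraj (QuickSortSteps pole l_kraj p_kraj)

-- ===== LEMMAS AND PROOFS =====
-- B's temp-variable swap writes the same list as A's simultaneous swap, for ALL Int indices
theorem pvSetSwap_comm (xs : List Int) (i j : Int) :
    PySem.List.pySetD (PySem.List.pySetD xs i (PySem.List.pyGetD xs j 0)) j (PySem.List.pyGetD xs i 0)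
      = pvSwap xs j i := by
  unfold pvSwap
  rcases hi : PySem.List.pyIdx? xs.length i with _ | a <;>
    rcases hj : PySem.List.pyIdx? xs.length j with _ | b
  · simp [PySem.List.pySetD, PySem.List.pySet?, hi, hj]
  · simp [PySem.List.pySetD, PySem.List.pySet?, hi, hj, List.length_set]
  · simp [PySem.List.pySetD, PySem.List.pySet?, hi, hj, List.length_set]
  · by_cases hab : a = b
    · subst hab
      simp [PySem.List.pySetD, PySem.List.pySet?, PySem.List.pyGetD, PySem.List.pyGet?,
            hi, hj, List.length_set, List.set_set]
    · simp [PySem.List.pySetD, PySem.List.pySet?, hi, hj, List.length_set]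
      exact List.set_comm _ _ hab

-- B's inner loop, run with fuel (hi - j).toNat, is A's partition fold over range(j, hi)
theorem pvInner_eq (hi : Int) :
    ∀ (n : Nat) (j : Int), (hi - j).toNat = n →
    ∀ (pole : List Int) (i c m : Int),
      pvInner hi n j pole i c m = (PySem.List.pyRange j hi 1).foldl (pvStepA hi) (pole, i, c, m) := by
  intro n
  induction n with
  | zero =>
    intro j hj pole i c m
    rw [PySem.List.pyRange_one_eq_nil (by omega)]
    rfl
  | succ n ih =>
    intro j hj pole i c m
    rw [PySem.List.pyRange_one_cons (show j < hi by omega)]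
    simp only [List.foldl_cons]
    by_cases hcond : PySem.List.pyGetD pole j 0 < PySem.List.pyGetD pole hi 0
    · have h1 : pvStepA hi (pole, i, c, m) j = (pvSwap pole j i, i + 1, c + 1, m + 2) := by
        simp [pvStepA, hcond]
      rw [h1]
      show pvInner hi (n + 1) j pole i c m = _
      rw [pvInner, if_pos hcond]
      simp only [pvSetSwap_comm]
      exact ih (j + 1) (by omega) _ _ _ _
    · have h1 : pvStepA hi (pole, i, c, m) j = (pole, i, c + 1, m) := by
        simp [pvStepA, hcond]
      rw [h1]
      show pvInner hi (n + 1) j pole i c m = _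
      rw [pvInner, if_neg hcond]
      exact ih (j + 1) (by omega) _ _ _ _

-- the counters thread additively through A's partition fold
theorem foldl_stepA_shift (hi : Int) (js : List Int) :
    ∀ (pole : List Int) (i c m : Int),
      js.foldl (pvStepA hi) (pole, i, c, m)
        = ((js.foldl (pvStepA hi) (pole, i, 0, 0)).1,
           (js.foldl (pvStepA hi) (pole, i, 0, 0)).2.1,
           c + (js.foldl (pvStepA hi) (pole, i, 0, 0)).2.2.1,
           m + (js.foldl (pvStepA hi) (pole, i, 0, 0)).2.2.2) := by
  induction js with
  | nil => intro pole i c m; simp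
  | cons j js ih =>
    intro pole i c m
    simp only [List.foldl_cons]
    by_cases hcond : PySem.List.pyGetD pole j 0 < PySem.List.pyGetD pole hi 0
    · have h1 : pvStepA hi (pole, i, c, m) j = (pvSwap pole j i, i + 1, c + 1, m + 2) := by
        simp [pvStepA, hcond]
      have h2 : pvStepA hi (pole, i, 0, 0) j = (pvSwap pole j i, i + 1, 0 + 1, 0 + 2) := by
        simp [pvStepA, hcond]
      rw [h1, h2, ih (pvSwap pole j i) (i + 1) (c + 1) (m + 2), ih (pvSwap pole j i) (i + 1) (0 + 1) (0 + 2)]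
      simp only [Prod.mk.injEq]
      refine ⟨trivial, trivial, by ring, by ring⟩
    · have h1 : pvStepA hi (pole, i, c, m) j = (pole, i, c + 1, m) := by
        simp [pvStepA, hcond]
      have h2 : pvStepA hi (pole, i, 0, 0) j = (pole, i, 0 + 1, 0) := by
        simp [pvStepA, hcond]
      rw [h1, h2, ih pole i (c + 1) m, ih pole i (0 + 1) 0]
      simp only [Prod.mk.injEq]
      refine ⟨trivial, trivial, by ring, by ring⟩

-- one pop of a non-trivial range = A's partition plus the final pivot swap
theorem pvOuter_succ_lt (n : Nat) (lo hi : Int) (h : lo < hi)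
    (rest : List (Int × Int)) (pole : List Int) (c m : Int) :
    pvOuter (n + 1) ((lo, hi) :: rest) pole c m
      = pvOuter n ((lo, (pvPartA pole lo hi).2.1 - 1) :: ((pvPartA pole lo hi).2.1 + 1, hi) :: rest)
          (pvSwap (pvPartA pole lo hi).1 (pvPartA pole lo hi).2.1 hi)
          (c + (pvPartA pole lo hi).2.2.1) (m + (pvPartA pole lo hi).2.2.2 + 2) := by
  have hinner := pvInner_eq hi (hi - lo).toNat lo rfl pole lo c m
  rw [foldl_stepA_shift] at hinner
  rw [pvOuter, if_neg (show ¬ hi ≤ lo by omega)]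
  rw [show pvInner hi (hi - lo).toNat lo pole lo c m
        = ((pvPartA pole lo hi).1, (pvPartA pole lo hi).2.1,
           c + (pvPartA pole lo hi).2.2.1, m + (pvPartA pole lo hi).2.2.2) from hinner]
  rfl

-- the partition pointer i moves from lo by at most the loop length
theorem pvStepA_foldl_i (hi : Int) (js : List Int) :
    ∀ st : List Int × Int × Int × Int,
      st.2.1 ≤ (js.foldl (pvStepA hi) st).2.1 ∧
      (js.foldl (pvStepA hi) st).2.1 ≤ st.2.1 + (js.length : Int) := by
  induction js with
  | nil => intro st; simp
  | cons j js ih =>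
    intro st
    have h := ih (pvStepA hi st j)
    have hstep : (pvStepA hi st j).2.1 = st.2.1 ∨ (pvStepA hi st j).2.1 = st.2.1 + 1 := by
      unfold pvStepA; split <;> simp
    simp only [List.foldl_cons, List.length_cons] at *
    omega

theorem pvPartA_bounds (pole : List Int) (lo hi : Int) (h : lo < hi) :
    lo ≤ (pvPartA pole lo hi).2.1 ∧ (pvPartA pole lo hi).2.1 ≤ hi := by
  have hb := pvStepA_foldl_i hi (PySem.List.pyRange lo hi 1) (pole, lo, 0, 0)
  simp only [PySem.List.length_pyRange_one] at hb
  unfold pvPartA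
  omega

-- A's recursion is insensitive to the fuel as long as it covers the range length
theorem pvQsA_fuel (n : Nat) :
    ∀ (m : Nat) (pole : List Int) (l p : Int),
      (p - l + 1).toNat ≤ n → (p - l + 1).toNat ≤ m →
      pvQsA n pole l p = pvQsA m pole l p := by
  induction n with
  | zero =>
    intro m pole l p hn _
    have h : ¬ l < p := by omega
    cases m with
    | zero => rfl
    | succ m => simp only [pvQsA, if_neg h]
  | succ n ih =>
    intro m pole l p hn hm
    by_cases h : l < p
    · obtain ⟨m', rfl⟩ : ∃ m', m = m' + 1 := by cases m with | zero => omega | succ k => exact ⟨k, rfl⟩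
      have hb := pvPartA_bounds pole l p h
      simp only [pvQsA, if_pos h]
      rw [ih m' (pvSwap (pvPartA pole l p).1 (pvPartA pole l p).2.1 p) l ((pvPartA pole l p).2.1 - 1)
            (by omega) (by omega)]
      rw [ih m' (pvQsA m' (pvSwap (pvPartA pole l p).1 (pvPartA pole l p).2.1 p) l ((pvPartA pole l p).2.1 - 1)).1
            ((pvPartA pole l p).2.1 + 1) p (by omega) (by omega)]
    · cases m with
      | zero => simp only [pvQsA, if_neg h]
      | succ m => simp only [pvQsA, if_neg h]

-- fuel potential of a stack (used only in the proofs)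
def pvPhi (stack : List (Int × Int)) : Nat :=
  (stack.map (fun r => 2 * (r.2 - r.1 + 1).toNat + 1)).sum

theorem pvPhi_cons (r : Int × Int) (s : List (Int × Int)) :
    pvPhi (r :: s) = 2 * (r.2 - r.1 + 1).toNat + 1 + pvPhi s := by
  simp [pvPhi]

-- B's loop is insensitive to the fuel as long as it covers the stack's potential
theorem pvOuter_fuel (n : Nat) :
    ∀ (m : Nat) (stack : List (Int × Int)) (pole : List Int) (c mv : Int),
      pvPhi stack ≤ n → pvPhi stack ≤ m →
      pvOuter n stack pole c mv = pvOuter m stack pole c mv := by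
  induction n with
  | zero =>
    intro m stack pole c mv hn _
    cases stack with
    | nil => cases m <;> rfl
    | cons r rest => rw [pvPhi_cons] at hn; omega
  | succ n ih =>
    intro m stack pole c mv hn hm
    cases stack with
    | nil => cases m <;> rfl
    | cons r rest =>
      obtain ⟨lo, hi⟩ := r
      rw [pvPhi_cons] at hn hm
      obtain ⟨m', rfl⟩ : ∃ m', m = m' + 1 := by cases m with | zero => omega | succ k => exact ⟨k, rfl⟩
      by_cases h : lo < hi
      · have hb := pvPartA_bounds pole lo hi h
        rw [pvOuter_succ_lt n lo hi h, pvOuter_succ_lt m' lo hi h]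
        exact ih m' _ _ _ _
          (by rw [pvPhi_cons, pvPhi_cons]; omega) (by rw [pvPhi_cons, pvPhi_cons]; omega)
      · simp only [pvOuter, if_pos (show hi ≤ lo by omega)]
        exact ih m' _ _ _ _ (by omega) (by omega)

-- popping a range off the stack behaves like one recursive call of A, then the rest of the stack
theorem pvOuter_cons (n : Nat) :
    ∀ (lo hi : Int), (hi - lo).toNat ≤ n →
    ∀ (rest : List (Int × Int)) (pole : List Int) (c m : Int) (f g : Nat),
      pvPhi ((lo, hi) :: rest) ≤ f → pvPhi rest ≤ g →
      pvOuter f ((lo, hi) :: rest) pole c m =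
        pvOuter g rest (pvQsA (hi - lo + 1).toNat pole lo hi).1
          (c + (pvQsA (hi - lo + 1).toNat pole lo hi).2.1)
          (m + (pvQsA (hi - lo + 1).toNat pole lo hi).2.2) := by
  induction n with
  | zero =>
    intro lo hi hn rest pole c m f g hf hg
    have h : ¬ lo < hi := by omega
    rw [pvPhi_cons] at hf
    obtain ⟨f', rfl⟩ : ∃ f', f = f' + 1 := by cases f with | zero => omega | succ k => exact ⟨k, rfl⟩
    have hq : pvQsA (hi - lo + 1).toNat pole lo hi = (pole, 0, 0) := by
      rcases hK : (hi - lo + 1).toNat with _ | k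
      · rfl
      · simp only [pvQsA, if_neg h]
    rw [hq]
    simp only [pvOuter, if_pos (show hi ≤ lo by omega)]
    rw [pvOuter_fuel f' g rest pole c m (by omega) hg]
    simp
  | succ n ih =>
    intro lo hi hn rest pole c m f g hf hg
    by_cases h : lo < hi
    · have hb := pvPartA_bounds pole lo hi h
      rw [pvPhi_cons] at hf
      obtain ⟨f', rfl⟩ : ∃ f', f = f' + 1 := by cases f with | zero => omega | succ k => exact ⟨k, rfl⟩
      have hK : (hi - lo + 1).toNat = (hi - lo).toNat + 1 := by omega
      rw [pvOuter_succ_lt f' lo hi h]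
      rw [ih lo ((pvPartA pole lo hi).2.1 - 1) (by omega) _ _ _ _ f' (pvPhi (((pvPartA pole lo hi).2.1 + 1, hi) :: rest))
            (by rw [pvPhi_cons, pvPhi_cons]; omega) (le_refl _)]
      rw [ih ((pvPartA pole lo hi).2.1 + 1) hi (by omega) _ _ _ _ _ g (le_refl _) hg]
      rw [hK]
      simp only [pvQsA, if_pos h]
      rw [pvQsA_fuel ((pvPartA pole lo hi).2.1 - 1 - lo + 1).toNat (hi - lo).toNat
            (pvSwap (pvPartA pole lo hi).1 (pvPartA pole lo hi).2.1 hi) lo ((pvPartA pole lo hi).2.1 - 1)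
            (le_refl _) (by omega)]
      rw [pvQsA_fuel (hi - ((pvPartA pole lo hi).2.1 + 1) + 1).toNat (hi - lo).toNat
            _ ((pvPartA pole lo hi).2.1 + 1) hi (le_refl _) (by omega)]
      ring_nf
    · rw [pvPhi_cons] at hf
      obtain ⟨f', rfl⟩ : ∃ f', f = f' + 1 := by cases f with | zero => omega | succ k => exact ⟨k, rfl⟩
      have hq : pvQsA (hi - lo + 1).toNat pole lo hi = (pole, 0, 0) := by
        rcases hK : (hi - lo + 1).toNat with _ | k
        · rfl
        · simp only [pvQsA, if_neg h]
      rw [hq]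
      simp only [pvOuter, if_pos (show hi ≤ lo by omega)]
      rw [pvOuter_fuel f' g rest pole c m (by omega) hg]
      simp

-- ===== VERDICT (by name: the statement is the Claim_ definition above) =====
theorem QuickSortSteps_spec : Claim_equal_QuickSortSteps := by
  intro pole l_kraj p_kraj _ _
  unfold Spec_QuickSortSteps QuickSortSteps QuickSortSteps_alt
  rw [pvOuter_cons (p_kraj - l_kraj).toNat l_kraj p_kraj (le_refl _) [] pole 0 0
        (2 * (p_kraj - l_kraj + 1).toNat + 1) 0 (by rw [pvPhi_cons]; simp [pvPhi]) (by simp [pvPhi])]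
  simp [pvOuter]
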